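-- pv_equiv track=rewrite | github.com/simonfqy/SimonfqyGitHub | lintcode/medium/1639_k_substring_with_k_different_characters.py | KSubstring
-- ===== SOURCE A (Python) =====
-- def KSubstring(stringIn, K):
--     substrings = set()
--     n = len(stringIn)
--     right = 0
--     unique_char_for_each_word = set()
--     for left in range(n - K + 1):
--         while right < n and len(unique_char_for_each_word) < K:
--             if stringIn[right] in unique_char_for_each_word:
--                 break
--             unique_char_for_each_word.add(stringIn[right])
--             right += 1
--             if len(unique_char_for_each_word) == K:
--                 substrings.add(stringIn[left : right])
--         unique_char_for_each_word.remove(stringIn[left])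
--
--     return len(substrings)
-- ===== SOURCE B (Python) =====
-- def KSubstring(stringIn, K):
--     # Count distinct length-K substrings consisting of K different characters:
--     # check each window directly instead of maintaining a sliding window.
--     n = len(stringIn)
--     found = set()
--     for i in range(n - K + 1):
--         window = stringIn[i:i + K]
--         if len(set(window)) == K:
--             found.add(window)
--     return len(found)
-- ===== Notes on version B (the rewrite author's own statement) =====
-- stated objective: simpler
-- what changed: A maintains a two-pointer sliding window with an incrementally updated character set (extend-until-duplicate, then remove the left char); B simply slices each length-K window and checks len(set(window)) == K directly, with no cross-iteration state; B is slower on large inputs with large K.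
import Mathlib
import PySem

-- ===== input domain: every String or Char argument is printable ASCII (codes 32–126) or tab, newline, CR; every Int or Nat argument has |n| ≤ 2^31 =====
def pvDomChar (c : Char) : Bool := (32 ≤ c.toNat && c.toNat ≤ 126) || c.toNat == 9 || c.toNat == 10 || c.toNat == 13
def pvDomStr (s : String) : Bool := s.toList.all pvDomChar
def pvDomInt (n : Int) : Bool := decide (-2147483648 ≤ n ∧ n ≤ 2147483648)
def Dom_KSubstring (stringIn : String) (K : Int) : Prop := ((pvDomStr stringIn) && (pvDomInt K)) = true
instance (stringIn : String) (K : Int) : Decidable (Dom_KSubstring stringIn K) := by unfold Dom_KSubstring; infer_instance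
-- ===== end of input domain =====

-- B replaces A's two-pointer sliding window (incrementally maintained character set)
-- by a direct per-window check (slice each length-K window, test it has K distinct
-- chars): simpler, stateless across iterations; not measured faster.


-- ===== PORT A =====
-- The inner 'while right < n and len(unique_char_for_each_word) < K: …' loop of A.
-- Substrings are kept as their char lists (string slicing = list slicing on code
-- points; only the final set size is returned).
def KSubWhile (s : List Char) (K : Int) (left : Nat) (right : Nat)
    (uc : PySem.Set Char) (subs : PySem.Set (List Char)) :
    Nat × PySem.Set Char × PySem.Set (List Char) :=
  if h : right < s.length then
    if ((uc.length : Int) < K) then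
      -- if stringIn[right] in unique_char_for_each_word: break
      if uc.contains s[right] then (right, uc, subs)
      else
        -- add stringIn[right]; right += 1; if len(uc) == K: substrings.add(stringIn[left:right])
        KSubWhile s K left (right + 1) (uc.add s[right])
          (if (((uc.add s[right]).length : Int) = K)
           then subs.add (PySem.List.slice s (some (left : Int)) (some ((right + 1 : Nat) : Int)))
           else subs)
    else (right, uc, subs)
  else (right, uc, subs)
termination_by s.length - right

-- one iteration of A's 'for left in range(n - K + 1)' loop
def KSubStepA (s : List Char) (K : Int) (st : Nat × PySem.Set Char × PySem.Set (List Char))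
    (left : Int) : Nat × PySem.Set Char × PySem.Set (List Char) :=
  match KSubWhile s K left.toNat st.1 st.2.1 st.2.2 with
  | (right', uc', subs') =>
    -- Python: uc.remove(stringIn[left]) raises KeyError if absent (and stringIn[left]
    -- raises IndexError for K ≤ 0 on ''); total form via discard/getD — exact under Pre_ (K ≥ 1).
    (right', uc'.discard ((PySem.List.pyGet? s left).getD ' '), subs')

def KSubstring (stringIn : String) (K : Int) : Int :=
  let s := stringIn.toList
  let n := s.length
  let res := (PySem.List.pyRange 0 ((n : Int) - K + 1) 1).foldl (KSubStepA s K)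
    (0, PySem.Set.empty, PySem.Set.empty)
  ((res.2.2).length : Int)

-- ===== PORT B =====
-- one iteration of B's loop: window = stringIn[i:i+K]; if len(set(window)) == K: found.add(window)
def KSubStepB (s : List Char) (K : Int) (found : PySem.Set (List Char)) (i : Int) :
    PySem.Set (List Char) :=
  if (((PySem.Set.ofList (PySem.List.slice s (some i) (some (i + K)))).length : Int) = K)
  then found.add (PySem.List.slice s (some i) (some (i + K)))
  else found

def KSubstring_alt (stringIn : String) (K : Int) : Int :=
  let s := stringIn.toList
  let n := s.length
  let found := (PySem.List.pyRange 0 ((n : Int) - K + 1) 1).foldl (KSubStepB s K) PySem.Set.empty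
  ((found).length : Int)

-- ===== PRECONDITION & SPEC =====
-- Pre_ excludes exactly K ≤ 0: there Python A always raises (KeyError removing
-- stringIn[left] from the empty character set, or IndexError on the empty string).
def Pre_KSubstring (stringIn : String) (K : Int) : Prop := 1 ≤ K
instance (stringIn : String) (K : Int) : Decidable (Pre_KSubstring stringIn K) := by unfold Pre_KSubstring; infer_instance
def pvWitness_KSubstring : String × Int := ("abcab", 3)

def Spec_KSubstring (stringIn : String) (K : Int) (out : Int) : Prop := out = KSubstring_alt stringIn K
instance (stringIn : String) (K : Int) (out : Int) : Decidable (Spec_KSubstring stringIn K out) := by unfold Spec_KSubstring; infer_instance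

-- ===== CLAIM (what is proved, stated in full; the proofs are below) =====
def Claim_equal_KSubstring : Prop := ∀ (stringIn : String) (K : Int), Dom_KSubstring stringIn K → Pre_KSubstring stringIn K → Spec_KSubstring stringIn K (KSubstring stringIn K)

-- ===== LEMMAS AND PROOFS =====

-- len(set(w)) == len(w) iff w has pairwise distinct elements
theorem ofList_len_iff (w : List Char) : (PySem.Set.ofList w).length = w.length ↔ w.Nodup := by
  induction w using List.reverseRecOn with
  | nil => simp
  | append_singleton xs x ih =>
    rw [PySem.Set.ofList_append_singleton]
    by_cases hx : x ∈ xs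
    · have h1 : (PySem.Set.ofList xs).add x = PySem.Set.ofList xs := by
        simp [PySem.Set.add, PySem.Set.mem_ofList, hx]
      have h2 := PySem.Set.length_ofList_le xs
      rw [h1]
      simp only [List.length_append, List.length_singleton]
      constructor
      · intro h; omega
      · intro h; exact absurd hx (by simp [List.nodup_append] at h; tauto)
    · have h1 : (PySem.Set.ofList xs).add x = PySem.Set.ofList xs ++ [x] := by
        simp [PySem.Set.add, PySem.Set.mem_ofList, hx]
      rw [h1]
      simp only [List.length_append, List.length_singleton]
      rw [List.nodup_append]
      simp only [List.nodup_singleton, true_and, List.mem_singleton, forall_eq]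
      constructor
      · intro h; exact ⟨ih.mp (by omega), fun a ha hax => hx (hax ▸ ha)⟩
      · rintro ⟨hnd, _⟩; rw [ih.mpr hnd]

theorem discard_cons_self (x : Char) (t : List Char) (hx : x ∉ t) :
    PySem.Set.discard (x :: t) x = t := by
  simp only [PySem.Set.discard, List.filter_cons]
  simp [List.filter_eq_self]
  intro a ha; exact fun h => hx (h ▸ ha)

-- Characterisation of A's inner while loop: starting from window [l, r) with
-- pairwise-distinct chars it stops at some W with the stated stop condition,
-- adding the window to `subs` exactly when it reached size k.
theorem whileA (s : List Char) (k : Nat) (hk : 1 ≤ k) (l r : Nat)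
    (subs : PySem.Set (List Char))
    (hln : l < s.length) (hlr : l ≤ r) (hrn : r ≤ s.length) (hsz : r - l < k)
    (hnd : ((s.drop l).take (r - l)).Nodup) :
    ∃ W, l + 1 ≤ W ∧ r ≤ W ∧ W ≤ s.length ∧ W - l ≤ k ∧
      ((s.drop l).take (W - l)).Nodup ∧
      (W - l = k ∨ W = s.length ∨ ∃ h : W < s.length, s[W] ∈ (s.drop l).take (W - l)) ∧
      KSubWhile s (k : Int) l r ((s.drop l).take (r - l)) subs =
        (W, (s.drop l).take (W - l),
         if W - l = k then subs.add ((s.drop l).take k) else subs) := by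
  have hucl : ((s.drop l).take (r - l)).length = r - l := by
    simp [List.length_take, List.length_drop]; omega
  by_cases hr : r < s.length
  · by_cases hmem : s[r] ∈ (s.drop l).take (r - l)
    · -- break: duplicate at right
      have hlr' : l < r := by
        rcases Nat.lt_or_ge l r with h | h
        · exact h
        · exfalso; have : r - l = 0 := by omega
          rw [this] at hmem; simp at hmem
      refine ⟨r, by omega, le_refl r, hrn, by omega, hnd, Or.inr (Or.inr ⟨hr, hmem⟩), ?_⟩
      rw [KSubWhile, dif_pos hr, if_pos (by rw [hucl]; exact_mod_cast hsz),
        if_pos ((PySem.Set.contains_iff _ _).mpr hmem)]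
      rw [if_neg (by omega)]
    · -- extend the window by s[r]
      have hcontains : ¬ PySem.Set.contains ((s.drop l).take (r - l)) s[r] = true := by
        rw [PySem.Set.contains_iff]; exact hmem
      have hgetr : (s.drop l)[r - l]? = some s[r] := by
        rw [List.getElem?_eq_getElem (by simp [List.length_drop]; omega)]
        congr 1
        rw [List.getElem_drop]
        congr 1; omega
      have hsub1 : r + 1 - l = (r - l) + 1 := by omega
      have hadd : PySem.Set.add ((s.drop l).take (r - l)) s[r] = (s.drop l).take (r + 1 - l) := by
        rw [PySem.Set.add, if_neg hcontains, hsub1, List.take_add_one, hgetr]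
        rfl
      have hnd' : ((s.drop l).take (r + 1 - l)).Nodup := by
        rw [hsub1, List.take_add_one, hgetr]
        simp only [Option.toList_some, List.nodup_append, List.nodup_singleton,
          List.mem_singleton, forall_eq, true_and]
        exact ⟨hnd, fun a ha hax => hmem (hax ▸ ha)⟩
      have haddlen : ((s.drop l).take (r + 1 - l)).length = r + 1 - l := by
        simp [List.length_take, List.length_drop]; omega
      have hslice : PySem.List.slice s (some (l : Int)) (some ((r + 1 : Nat) : Int))
          = (s.drop l).take (r + 1 - l) := by
        rw [PySem.List.slice_natCast]
      have hstep1 : KSubWhile s (k : Int) l r ((s.drop l).take (r - l)) subs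
          = KSubWhile s (k : Int) l (r + 1) ((s.drop l).take (r + 1 - l))
              (if r + 1 - l = k then subs.add ((s.drop l).take (r + 1 - l)) else subs) := by
        rw [KSubWhile, dif_pos hr, if_pos (by rw [hucl]; exact_mod_cast hsz),
          if_neg hcontains, hadd, hslice, haddlen]
        congr 1
        split_ifs with h1 h2 h2
        · rfl
        · exact absurd (by exact_mod_cast h1) h2
        · exact absurd (by exact_mod_cast h2) h1
        · rfl
      by_cases hfull : r + 1 - l = k
      · -- window reached size k: the while stops immediately after
        have hstop : KSubWhile s (k : Int) l (r + 1) ((s.drop l).take (r + 1 - l))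
            (subs.add ((s.drop l).take (r + 1 - l)))
            = (r + 1, (s.drop l).take (r + 1 - l), subs.add ((s.drop l).take (r + 1 - l))) := by
          rw [KSubWhile]
          by_cases h1 : r + 1 < s.length
          · rw [dif_pos h1, if_neg (by rw [haddlen]; omega)]
          · rw [dif_neg h1]
        refine ⟨r + 1, by omega, by omega, by omega, by omega, hnd', Or.inl hfull, ?_⟩
        rw [hstep1, if_pos hfull, hstop, if_pos hfull, hfull]
      · -- window still smaller than k: recurse
        obtain ⟨W, hW1, hW2, hW3, hW4, hW5, hW6, hWeq⟩ :=
          whileA s k hk l (r + 1) subs hln (by omega) (by omega) (by omega) hnd'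
        refine ⟨W, hW1, by omega, hW3, hW4, hW5, hW6, ?_⟩
        rw [hstep1, if_neg hfull, hWeq]
  · -- right = n: while condition fails
    have hrl : r = s.length := by omega
    refine ⟨r, by omega, le_refl r, hrn, by omega, hnd, Or.inr (Or.inl hrl), ?_⟩
    rw [KSubWhile, dif_neg hr, if_neg (by omega)]
termination_by s.length - r

-- Invariant of A's outer loop: from any left index a with window [a, r) the rest
-- of A's fold produces exactly what B's fold over the same range produces.
theorem outerA (s : List Char) (k : Nat) (hk : 1 ≤ k) (a r : Nat)
    (subs : PySem.Set (List Char))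
    (hab : a + k ≤ s.length + 1) (har : a ≤ r) (hrn : r ≤ s.length) (hrk : r - a < k)
    (hnd : ((s.drop a).take (r - a)).Nodup) :
    ((PySem.List.pyRange (a : Int) ((s.length : Int) - (k : Int) + 1) 1).foldl
        (KSubStepA s (k : Int)) (r, (s.drop a).take (r - a), subs)).2.2
    = (PySem.List.pyRange (a : Int) ((s.length : Int) - (k : Int) + 1) 1).foldl
        (KSubStepB s (k : Int)) subs := by
  by_cases hend : a + k = s.length + 1
  · rw [PySem.List.pyRange_one_eq_nil (by omega)]
    rfl
  · have hak : a + k ≤ s.length := by omega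
    have haln : a < s.length := by omega
    rw [PySem.List.pyRange_one_cons (by omega : (a : Int) < (s.length : Int) - (k : Int) + 1)]
    rw [List.foldl_cons, List.foldl_cons]
    obtain ⟨W, hW1, hW2, hW3, hW4, hW5, hW6, hWeq⟩ :=
      whileA s k hk a r subs haln har hrn hrk hnd
    -- the window B examines at index a
    have hwin : PySem.List.slice s (some (a : Int)) (some ((a : Int) + (k : Int)))
        = (s.drop a).take k := by
      have : (a : Int) + (k : Int) = ((a + k : Nat) : Int) := by push_cast; ring
      rw [this, PySem.List.slice_natCast]
      congr 1; omega
    have hwinlen : ((s.drop a).take k).length = k := by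
      simp [List.length_take, List.length_drop]; omega
    -- A adds the window iff it has k pairwise-distinct chars iff B adds it
    have hiff : W - a = k ↔ ((s.drop a).take k).Nodup := by
      constructor
      · intro h; rw [← h]; exact hW5
      · intro hwnd
        rcases hW6 with h | h | ⟨hWlt, hWmem⟩
        · exact h
        · omega
        · by_contra hne
          have hlt : W - a < k := by omega
          have hgetW : (s.drop a)[W - a]? = some s[W] := by
            rw [List.getElem?_eq_getElem (by simp [List.length_drop]; omega)]
            congr 1
            rw [List.getElem_drop]
            congr 1; omega
          have hpre : (s.drop a).take (W - a + 1)
              = ((s.drop a).take k).take (W - a + 1) := by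
            rw [List.take_take]
            congr 1; omega
          have hnd1 : ((s.drop a).take (W - a + 1)).Nodup := by
            rw [hpre]; exact hwnd.sublist (List.take_sublist _ _)
          rw [List.take_add_one, hgetW] at hnd1
          simp only [Option.toList_some, List.nodup_append, List.nodup_singleton,
            List.mem_singleton, forall_eq, true_and] at hnd1
          exact hnd1.2 s[W] hWmem rfl
    -- A's iteration result = B's iteration result, and the new window state is [a+1, W)
    have hgeta : (PySem.List.pyGet? s (a : Int)).getD ' ' = s[a] := by
      rw [PySem.List.pyGet?_natCast, List.getElem?_eq_getElem haln]
      rfl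
    have hdropa : s.drop a = s[a] :: s.drop (a + 1) := List.drop_eq_getElem_cons haln
    have hucW : (s.drop a).take (W - a) = s[a] :: (s.drop (a + 1)).take (W - (a + 1)) := by
      rw [hdropa]
      have : W - a = (W - (a + 1)) + 1 := by omega
      rw [this, List.take_succ_cons]
    have hdisc : PySem.Set.discard ((s.drop a).take (W - a)) s[a]
        = (s.drop (a + 1)).take (W - (a + 1)) := by
      rw [hucW]
      apply discard_cons_self
      have := hW5
      rw [hucW] at this
      exact (List.nodup_cons.mp this).1
    have hstA : KSubStepA s (k : Int) (r, (s.drop a).take (r - a), subs) (a : Int)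
        = (W, (s.drop (a + 1)).take (W - (a + 1)),
           if W - a = k then subs.add ((s.drop a).take k) else subs) := by
      rw [KSubStepA]
      simp only [Int.toNat_natCast]
      rw [hWeq, hgeta, hdisc]
    have hstB : KSubStepB s (k : Int) subs (a : Int)
        = (if W - a = k then subs.add ((s.drop a).take k) else subs) := by
      rw [KSubStepB, hwin]
      split_ifs with h1 h2 h2
      · rfl
      · refine absurd (hiff.mpr ((ofList_len_iff _).mp ?_)) h2
        have h1' : (PySem.Set.ofList ((s.drop a).take k)).length = k := by exact_mod_cast h1
        rw [h1', hwinlen]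
      · refine absurd ?_ h1
        have heq : PySem.Set.ofList ((s.drop a).take k) = (s.drop a).take k :=
          PySem.Set.ofList_eq_self_of_nodup _ (hiff.mp h2)
        rw [heq, hwinlen]
      · rfl
    rw [hstA, hstB]
    have hnd'' : ((s.drop (a + 1)).take (W - (a + 1))).Nodup := by
      have := hW5
      rw [hucW] at this
      exact (List.nodup_cons.mp this).2
    have := outerA s k hk (a + 1) W
      (if W - a = k then subs.add ((s.drop a).take k) else subs)
      (by omega) hW1 hW3 (by omega) hnd''
    have hcast : ((a : Int) + 1) = ((a + 1 : Nat) : Int) := by push_cast; ring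
    rw [hcast]
    exact this
termination_by s.length + 1 - a
decreasing_by omega

-- ===== VERDICT (by name: the statement is the Claim_ definition above) =====
theorem KSubstring_spec : Claim_equal_KSubstring := by
  intro str K _ hK
  have hK1 : (1 : Int) ≤ K := hK
  unfold Spec_KSubstring KSubstring KSubstring_alt
  have hKk : K = ((K.toNat : Nat) : Int) := (Int.toNat_of_nonneg (by omega)).symm
  by_cases hkn : K.toNat ≤ str.toList.length
  · have h := outerA str.toList K.toNat (by omega) 0 0 PySem.Set.empty
      (by omega) (le_refl 0) (Nat.zero_le _) (by omega) (by simp)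
    rw [hKk]
    simp only []
    have h' : (List.foldl (KSubStepA str.toList ((K.toNat : Nat) : Int))
          (0, PySem.Set.empty, PySem.Set.empty)
          (PySem.List.pyRange 0 ((str.toList.length : Int) - ((K.toNat : Nat) : Int) + 1) 1)).2.2
        = List.foldl (KSubStepB str.toList ((K.toNat : Nat) : Int)) PySem.Set.empty
          (PySem.List.pyRange 0 ((str.toList.length : Int) - ((K.toNat : Nat) : Int) + 1) 1) := h
    rw [h']
  · have hb : (str.toList.length : Int) - K + 1 ≤ 0 := by
      have : str.toList.length < K.toNat := by omega
      omega
    simp only []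
    rw [PySem.List.pyRange_one_eq_nil hb]
    rfl
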